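-- pv_equiv track=rewrite | github.com/hghyhghy/Codechef-Coding-Ninja | Desktop/DSA/T43/9.py | sorting_binary_zero_one
-- ===== SOURCE A (Python) =====
-- def sorting_binary_zero_one(array):
--
--     current = 0
--     n=len(array)
--     for i in range(n):
--
--         if array[i] == 0:
--
--             array[i],array[current] = array[current],array[i]
--
--             current += 1
--
--     return array
-- ===== SOURCE B (Python) =====
-- def sorting_binary_zero_one(array):
--     # Stable partition: all zeros first, everything else after, in input order.
--     # Mutates the list in place and returns it.
--     zeros = [x for x in array if x == 0]
--     rest = [x for x in array if x != 0]
--     array[:] = zeros + rest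
--     return array
-- ===== Notes on version B (the rewrite author's own statement) =====
-- stated objective: simpler
-- what changed: Replaced the in-place two-pointer swap loop with a stable filter-and-concatenate partition (zeros comprehension + nonzeros comprehension, written back via slice assignment); Pre_ excludes arrays where some zero is preceded by two distinct nonzero values, because there the relative order of the nonzeros in the result is unspecified for a zeros-first partition and A's swaps leave them in an accidental rotated order while B keeps input order.
-- outside the precondition, e.g. on sorting_binary_zero_one([1, 2, 0]): A returns [0, 2, 1], B returns [0, 1, 2]; on sorting_binary_zero_one([3, 4, 0, 0, 5, 0]): A returns [0, 0, 0, 4, 5, 3], B returns [0, 0, 0, 3, 4, 5]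
import Mathlib
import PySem

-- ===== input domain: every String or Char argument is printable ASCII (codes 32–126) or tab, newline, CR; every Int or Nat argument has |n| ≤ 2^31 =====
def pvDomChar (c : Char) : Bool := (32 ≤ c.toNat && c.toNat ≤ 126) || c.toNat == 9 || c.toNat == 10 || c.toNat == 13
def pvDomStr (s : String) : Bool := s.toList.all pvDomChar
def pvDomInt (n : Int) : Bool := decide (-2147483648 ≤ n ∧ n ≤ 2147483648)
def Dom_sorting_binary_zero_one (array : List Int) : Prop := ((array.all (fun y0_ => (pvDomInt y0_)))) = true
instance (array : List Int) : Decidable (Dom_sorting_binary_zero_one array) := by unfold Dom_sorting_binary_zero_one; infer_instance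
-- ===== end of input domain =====

-- B replaces A's in-place two-pointer swap loop by a stable filter-and-concatenate
-- partition (simpler); both Pythons mutate the argument in place and return it —
-- the equivalence proved here is about the return value.

-- ===== PORT A =====
-- one loop iteration: if array[i] == 0, swap array[i] and array[current], current += 1.
-- Indices i and current are provably in range here, so pyGetD/pySetD are exact
-- (the Python raises nowhere on these accesses).
def pvAStep (st : List Int × Int) (i : Int) : List Int × Int :=
  let arr := st.1
  let current := st.2
  if PySem.List.pyGetD arr i 0 = 0 then
    let ai := PySem.List.pyGetD arr i 0
    let ac := PySem.List.pyGetD arr current 0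
    (PySem.List.pySetD (PySem.List.pySetD arr i ac) current ai, current + 1)
  else
    (arr, current)

def sorting_binary_zero_one (array : List Int) : List Int :=
  let n : Int := array.length
  ((PySem.List.pyRange 0 n 1).foldl pvAStep (array, 0)).1

-- ===== PORT B =====
-- zeros = [x for x in array if x == 0]; rest = [x for x in array if x != 0]; zeros + rest
def sorting_binary_zero_one_alt (array : List Int) : List Int :=
  let zeros := array.filter (fun x => x == 0)
  let rest := array.filter (fun x => !(x == 0))
  zeros ++ rest

-- ===== PRECONDITION & SPEC =====
-- Pre_ excludes arrays in which some zero is preceded by two distinct nonzero values: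
-- there the relative order of the nonzeros in the result is unspecified for a
-- zeros-first partition — A's swaps leave them in an accidental rotated order while
-- B keeps input order; on every admitted array the two orders coincide.
def Pre_sorting_binary_zero_one (array : List Int) : Prop :=
  ∀ j ∈ List.range array.length, array.getD j 1 = 0 →
    ((array.take j).filter (fun x => !(x == 0))).Pairwise (· = ·)
instance (array : List Int) : Decidable (Pre_sorting_binary_zero_one array) := by
  unfold Pre_sorting_binary_zero_one; infer_instance

def pvWitness_sorting_binary_zero_one : List Int := [0, 1, 0, 1]

def Spec_sorting_binary_zero_one (array : List Int) (out : List Int) : Prop := out = sorting_binary_zero_one_alt array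
instance (array : List Int) (out : List Int) : Decidable (Spec_sorting_binary_zero_one array out) := by unfold Spec_sorting_binary_zero_one; infer_instance

-- ===== CLAIM (what is proved, stated in full; the proofs are below) =====
def Claim_equal_sorting_binary_zero_one : Prop := ∀ (array : List Int), Dom_sorting_binary_zero_one array → Pre_sorting_binary_zero_one array → Spec_sorting_binary_zero_one array (sorting_binary_zero_one array)

-- ===== LEMMAS AND PROOFS =====

-- Proof device: A's loop in value form — state (zeros seen, pending nonzero block);
-- a zero rotates the pending block left by one (that is what A's swap does).
def pvBStep (st : Nat × List Int) (x : Int) : Nat × List Int :=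
  if x = 0 then
    (st.1 + 1, match st.2 with
               | [] => []
               | p :: ps => ps ++ [p])
  else
    (st.1, st.2 ++ [x])

theorem pvGetMid (z : Nat) (pre post : List Int) (x : Int) (h : pre.length = z) :
    PySem.List.pyGetD (pre ++ x :: post) ((z : Int)) 0 = x := by
  subst h
  rw [show ((pre.length : Int)) = ((pre.length : Nat) : Int) from rfl, PySem.List.pyGetD_natCast]
  rw [List.getD_eq_getElem?_getD, List.getElem?_append_right (by simp)]
  simp

theorem pvSetMid (z : Nat) (pre post : List Int) (x v : Int) (h : pre.length = z) :
    (pre ++ x :: post).set z v = pre ++ v :: post := by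
  subst h
  rw [List.set_append_right _ _ (by omega)]
  simp

theorem pvStepNilZero (z : Nat) (rs : List Int) :
    pvAStep (List.replicate z (0:Int) ++ 0 :: rs, (z : Int)) ((z : Int))
      = (List.replicate (z+1) (0:Int) ++ rs, (z : Int) + 1) := by
  simp only [pvAStep]
  rw [pvGetMid z _ _ _ (by simp)]
  simp only [ite_true]
  rw [PySem.List.pySetD_natCast, PySem.List.pySetD_natCast]
  rw [pvSetMid z _ _ _ _ (by simp), pvSetMid z _ _ _ _ (by simp)]
  simp [List.replicate_succ']

theorem pvStepConsZero (z : Nat) (p : Int) (ps rs : List Int) :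
    pvAStep (List.replicate z (0:Int) ++ (p :: ps) ++ 0 :: rs, (z : Int)) ((z : Int) + (p :: ps).length)
      = (List.replicate (z+1) (0:Int) ++ (ps ++ [p]) ++ rs, (z : Int) + 1) := by
  simp only [pvAStep]
  have hi : ((z : Int) + (p :: ps).length) = (((z + (p::ps).length : Nat)) : Int) := by push_cast; ring
  rw [hi]
  rw [pvGetMid (z + (p::ps).length) (List.replicate z 0 ++ (p :: ps)) _ _ (by simp)]
  simp only [ite_true]
  rw [show PySem.List.pyGetD (List.replicate z (0:Int) ++ p :: ps ++ 0 :: rs) ((z:Int)) 0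
      = PySem.List.pyGetD ((List.replicate z (0:Int)) ++ p :: (ps ++ 0 :: rs)) ((z:Int)) 0 from (by simp)]
  rw [pvGetMid z _ _ _ (by simp)]
  rw [PySem.List.pySetD_natCast, PySem.List.pySetD_natCast]
  rw [pvSetMid (z + (p::ps).length) (List.replicate z 0 ++ (p :: ps)) _ _ _ (by simp)]
  rw [show List.replicate z (0:Int) ++ p :: ps ++ p :: rs
      = List.replicate z (0:Int) ++ p :: (ps ++ p :: rs) from (by simp)]
  rw [pvSetMid z _ _ _ _ (by simp)]
  simp [List.replicate_succ']

theorem pvStepNonzero (z : Nat) (pending rs : List Int) (x : Int) (hx : x ≠ 0) :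
    pvAStep (List.replicate z (0:Int) ++ pending ++ x :: rs, (z : Int)) ((z : Int) + pending.length)
      = (List.replicate z (0:Int) ++ (pending ++ [x]) ++ rs, (z : Int)) := by
  simp only [pvAStep]
  have hi : ((z : Int) + pending.length) = (((z + pending.length : Nat)) : Int) := by push_cast; ring
  rw [hi, pvGetMid (z + pending.length) (List.replicate z 0 ++ pending) _ _ (by simp)]
  simp [hx]

-- Loop invariant: after A has processed the first z + pending.length elements, its
-- array is replicate z 0 ++ pending ++ rest with current = z; the remaining
-- iterations produce exactly the pvBStep fold over rest started from (z, pending).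
theorem pvInv (rest : List Int) : ∀ (z : Nat) (pending : List Int),
    ((PySem.List.pyRange ((z : Int) + pending.length) ((z : Int) + pending.length + rest.length) 1).foldl
        pvAStep (List.replicate z 0 ++ pending ++ rest, (z : Int))).1
      = List.replicate (rest.foldl pvBStep (z, pending)).1 (0 : Int) ++ (rest.foldl pvBStep (z, pending)).2 := by
  induction rest with
  | nil =>
    intro z pending
    rw [PySem.List.pyRange_one_eq_nil (by simp)]
    simp
  | cons x rs ih =>
    intro z pending
    rw [PySem.List.pyRange_one_cons (by push_cast [List.length_cons]; omega), List.foldl_cons]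
    by_cases hx : x = 0
    · subst hx
      cases pending with
      | nil =>
        rw [show ((z:Int) + (([]:List Int)).length) = (z:Int) from (by simp),
          show (List.replicate z (0:Int) ++ [] ++ 0 :: rs) = List.replicate z (0:Int) ++ 0 :: rs from (by simp),
          pvStepNilZero]
        have key := ih (z+1) []
        rw [show (((z+1 : Nat):Int) + (([]:List Int)).length) = (z:Int) + 1 from (by push_cast [List.length_cons, List.length_nil, List.length_append]; ring),
          show (((z+1 : Nat):Int)) = (z:Int) + 1 from (by push_cast [List.length_cons, List.length_nil, List.length_append]; ring),
          show (List.replicate (z+1) (0:Int) ++ [] ++ rs) = List.replicate (z+1) (0:Int) ++ rs from (by simp)] at key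
        rw [show ((z:Int) + (((0:Int) :: rs).length : Nat)) = (z:Int) + 1 + rs.length from (by push_cast [List.length_cons, List.length_nil, List.length_append]; ring)]
        rw [key]
        simp [pvBStep]
      | cons p ps =>
        rw [pvStepConsZero]
        have key := ih (z+1) (ps ++ [p])
        rw [show (((z+1 : Nat):Int) + ((ps ++ [p]) : List Int).length) = (z:Int) + (p :: ps).length + 1 from
            (by push_cast [List.length_cons, List.length_nil, List.length_append]; ring),
          show (((z+1 : Nat):Int)) = (z:Int) + 1 from (by push_cast [List.length_cons, List.length_nil, List.length_append]; ring)] at key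
        rw [show ((z:Int) + ((p :: ps).length : Nat) + (((0:Int) :: rs).length : Nat))
            = (z:Int) + (p :: ps).length + 1 + rs.length from (by push_cast [List.length_cons, List.length_nil, List.length_append]; ring)]
        rw [key]
        simp [pvBStep]
    · rw [pvStepNonzero z pending rs x hx]
      have key := ih z (pending ++ [x])
      rw [show ((z:Int) + ((pending ++ [x]) : List Int).length) = (z:Int) + pending.length + 1 from
          (by push_cast [List.length_cons, List.length_nil, List.length_append]; ring)] at key
      rw [show ((z:Int) + (pending.length : Nat) + ((x :: rs).length : Nat))
          = (z:Int) + pending.length + 1 + rs.length from (by push_cast [List.length_cons, List.length_nil, List.length_append]; ring)]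
      rw [key]
      simp [pvBStep, hx]

-- rotating a block of pairwise-equal elements is the identity
theorem pvRotAllEq (p : Int) : ∀ (ps : List Int), (∀ y ∈ ps, p = y) → ps ++ [p] = p :: ps := by
  intro ps
  induction ps with
  | nil => intro _; rfl
  | cons q qs ih =>
    intro h
    have hq : p = q := h q (by simp)
    have := ih (fun y hy => h y (by simp [hy]))
    simp [this, ← hq]

-- Under the prefix condition, the rotation fold is the stable partition fold.
theorem pvRotFold (rest : List Int) : ∀ (z : Nat) (pending : List Int),
    (∀ j ∈ List.range rest.length, rest.getD j 1 = 0 →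
       (pending ++ ((rest.take j).filter (fun x => !(x == 0)))).Pairwise (· = ·)) →
    rest.foldl pvBStep (z, pending)
      = (z + rest.count 0, pending ++ rest.filter (fun x => !(x == 0))) := by
  induction rest with
  | nil => intro z pending _; simp
  | cons x rs ih =>
    intro z pending h
    by_cases hx : x = 0
    · subst hx
      have hp : pending.Pairwise (· = ·) := by
        have := h 0 (by simp) (by simp)
        simpa using this
      have hrot : (pvBStep (z, pending) 0) = (z + 1, pending) := by
        cases pending with
        | nil => simp [pvBStep]
        | cons p ps =>
          have hall : ∀ y ∈ ps, p = y := (List.pairwise_cons.mp hp).1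
          simp [pvBStep, pvRotAllEq p ps hall]
      rw [List.foldl_cons, hrot]
      have key := ih (z + 1) pending (by
        intro j hj hz
        have := h (j+1) (by simp at hj ⊢; omega) (by simpa using hz)
        simpa using this)
      rw [key]
      simp
      omega
    · have hstep : (pvBStep (z, pending) x) = (z, pending ++ [x]) := by simp [pvBStep, hx]
      rw [List.foldl_cons, hstep]
      have key := ih z (pending ++ [x]) (by
        intro j hj hz
        have := h (j+1) (by simp at hj ⊢; omega) (by simpa using hz)
        simpa [hx, List.append_assoc] using this)
      rw [key]
      simp [hx]

theorem pvFilterZeros (l : List Int) : l.filter (fun x => x == 0) = List.replicate (l.count 0) 0 := by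
  induction l with
  | nil => simp
  | cons x xs ih =>
    by_cases hx : x = 0
    · subst hx; simp [ih, List.replicate_succ]
    · simp [hx, ih]

-- ===== VERDICT (by name: the statement is the Claim_ definition above) =====
theorem sorting_binary_zero_one_spec : Claim_equal_sorting_binary_zero_one := by
  intro array _ hpre
  unfold Spec_sorting_binary_zero_one sorting_binary_zero_one sorting_binary_zero_one_alt
  have key := pvInv array 0 []
  have hrot := pvRotFold array 0 [] (by
    intro j hj hz
    simpa using hpre j hj hz)
  rw [hrot] at key
  simp only at key
  simpa [pvFilterZeros] using key
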